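-- pv_equiv track=rewrite | github.com/SheldonHH/algorithm-journey | src/class068/C5_MinimumDeleteBecomeSubstring.py | min_delete2
-- ===== SOURCE A (Python) =====
-- def min_delete2(s1, s2):
--     """
--     正式方法，动态规划
--     """
--     n, m = len(s1), len(s2)
--     dp = [[0] * (m + 1) for _ in range(n + 1)]
--     for i in range(1, n + 1):
--         dp[i][0] = i
--         for j in range(1, m + 1):
--             if s1[i - 1] == s2[j - 1]:
--                 dp[i][j] = dp[i - 1][j - 1]
--             else:
--                 dp[i][j] = dp[i - 1][j] + 1
--     return min(dp[n][j] for j in range(m + 1))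
-- ===== SOURCE B (Python) =====
-- def min_delete2(s1, s2):
--     # Greedy per end-index scan instead of the full DP table: for each end j,
--     # scan s1 right-to-left matching s2[:j] from its right end; the answer is
--     # len(s1) minus the longest match found.
--     best = 0
--     for j in range(len(s2) + 1):
--         k = j
--         for c in reversed(s1):
--             if k and c == s2[k - 1]:
--                 k -= 1
--         best = max(best, j - k)
--     return len(s1) - best
-- ===== Notes on version B (the rewrite author's own statement) =====
-- stated objective: alternative
-- what changed: Replaces the (n+1)x(m+1) deletion DP table and final row-minimum by, for each end index j of s2, a single greedy right-to-left scan of s1 with a pointer into s2[:j], returning len(s1) minus the longest match; no table is allocated.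
import Mathlib
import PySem

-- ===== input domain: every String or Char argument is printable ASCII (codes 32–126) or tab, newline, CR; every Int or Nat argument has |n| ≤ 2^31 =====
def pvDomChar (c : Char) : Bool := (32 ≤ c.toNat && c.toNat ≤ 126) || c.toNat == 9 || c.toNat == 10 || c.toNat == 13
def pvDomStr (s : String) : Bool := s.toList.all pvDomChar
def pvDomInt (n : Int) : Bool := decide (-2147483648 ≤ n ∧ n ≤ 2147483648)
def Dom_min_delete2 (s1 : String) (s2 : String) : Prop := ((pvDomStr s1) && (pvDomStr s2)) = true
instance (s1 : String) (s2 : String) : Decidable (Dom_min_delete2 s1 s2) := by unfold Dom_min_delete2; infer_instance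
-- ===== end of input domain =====

-- B replaces A's full DP table by a per-end-index greedy pointer scan (same O(n*m) work, no table).


-- ===== PORT A =====
-- inner loop over j = 1..m: cell j uses dp[i-1][j-1] (a) and dp[i-1][j] (b), same branch order as A
def rowTailA (c1 : Char) : List Char → List Int → List Int
  | c :: cs, a :: b :: ps => (if c1 = c then a else b + 1) :: rowTailA c1 cs (b :: ps)
  | _, _ => []

-- outer loop over i = 1..n: row i is i (dp[i][0] = i) prepended to the inner-loop cells
def dpRowsA (s2l : List Char) : List Int → Int → List Char → List Int
  | prev, _, [] => prev
  | prev, i, c :: cs => dpRowsA s2l ((i + 1) :: rowTailA c s2l prev) (i + 1) cs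

def min_delete2 (s1 : String) (s2 : String) : Int :=
  let s1l := s1.toList
  let s2l := s2.toList
  let row0 : List Int := List.replicate (s2l.length + 1) 0
  match dpRowsA s2l row0 0 s1l with
  | [] => 0  -- unreachable: every row is nonempty
  | a :: rest => rest.foldl min a  -- min(dp[n][j] for j in range(m+1))

-- ===== PORT B =====
-- inner loop: for c in reversed(s1): if k and c == s2[k-1]: k -= 1
def frB (s2l : List Char) : List Char → Nat → Nat
  | [], k => k
  | c :: rest, k => frB s2l rest (if k ≠ 0 ∧ s2l[k - 1]? = some c then k - 1 else k)

def min_delete2_alt (s1 : String) (s2 : String) : Int :=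
  let s1l := s1.toList
  let s2l := s2.toList
  let best := (List.range (s2l.length + 1)).foldl
    (fun best j => max best (j - frB s2l s1l.reverse j)) 0
  (s1l.length : Int) - (best : Int)

-- ===== PRECONDITION & SPEC =====
def Spec_min_delete2 (s1 : String) (s2 : String) (out : Int) : Prop := out = min_delete2_alt s1 s2
instance (s1 : String) (s2 : String) (out : Int) : Decidable (Spec_min_delete2 s1 s2 out) := by unfold Spec_min_delete2; infer_instance

-- ===== CLAIM (what is proved, stated in full; the proofs are below) =====
def Claim_equal_min_delete2 : Prop := ∀ (s1 : String) (s2 : String), Dom_min_delete2 s1 s2 → Spec_min_delete2 s1 s2 (min_delete2 s1 s2)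

-- ===== LEMMAS AND PROOFS =====

-- dp[i][j] as a function of the processed prefix p of s1 (i = p.length): i - j + (final pointer of B's scan)
def rowVal (s2l p : List Char) (j : Nat) : Int :=
  (p.length : Int) - (j : Int) + (frB s2l p.reverse j : Int)

def rowOf (s2l p : List Char) : List Int :=
  (List.range (s2l.length + 1)).map (rowVal s2l p)

theorem range_map_cons (n : ℕ) {α : Type} (u : ℕ → α) :
    (List.range (n + 1)).map u = u 0 :: (List.range n).map (fun j => u (j + 1)) := by
  simp [List.range_succ_eq_map, List.map_map, Function.comp]

theorem frB_zero (s2l : List Char) (l : List Char) : frB s2l l 0 = 0 := by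
  induction l with
  | nil => rfl
  | cons c rest ih => simp [frB, ih]

theorem frB_le (s2l : List Char) (l : List Char) (k : Nat) : frB s2l l k ≤ k := by
  induction l generalizing k with
  | nil => simp [frB]
  | cons c rest ih =>
    simp only [frB]
    split
    · exact le_trans (ih _) (Nat.sub_le _ _)
    · exact ih _

theorem rowTailA_map (c1 : Char) : ∀ (t : List Char) (v w : Nat → Int),
    (∀ j (h : j < t.length), w j = if c1 = t[j] then v j else v (j + 1) + 1) →
    rowTailA c1 t ((List.range (t.length + 1)).map v) = (List.range t.length).map w := by
  intro t
  induction t with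
  | nil => intro v w _; rfl
  | cons c cs ih =>
    intro v w h
    have e1 : (List.range ((c :: cs).length + 1)).map v
        = v 0 :: v 1 :: (List.range cs.length).map (fun j => v (j + 2)) := by
      rw [show (c :: cs).length + 1 = cs.length + 1 + 1 from rfl,
        range_map_cons, range_map_cons]
    have e2 : (List.range (c :: cs).length).map w
        = w 0 :: (List.range cs.length).map (fun j => w (j + 1)) := by
      rw [show (c :: cs).length = cs.length + 1 from rfl, range_map_cons]
    rw [e1, e2]
    simp only [rowTailA]
    refine congrArg₂ List.cons ?_ ?_
    · have := h 0 (Nat.succ_pos _)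
      simpa using this.symm
    · rw [show (v 1 :: (List.range cs.length).map (fun j => v (j + 2)))
          = (List.range (cs.length + 1)).map (fun j => v (j + 1)) from
        (range_map_cons cs.length (fun j => v (j + 1))).symm]
      exact ih (fun j => v (j + 1)) (fun j => w (j + 1))
        (fun j hj => by simpa using h (j + 1) (by simpa using Nat.succ_lt_succ hj))

theorem row_step (s2l p : List Char) (c : Char) :
    ((p.length : Int) + 1) :: rowTailA c s2l (rowOf s2l p) = rowOf s2l (p ++ [c]) := by
  unfold rowOf
  rw [range_map_cons s2l.length (rowVal s2l (p ++ [c]))]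
  have hrev : (p ++ [c]).reverse = c :: p.reverse := by simp
  refine congrArg₂ List.cons ?_ ?_
  · simp [rowVal, hrev, frB_zero]
  · apply rowTailA_map
    intro j hj
    have hget : s2l[j]? = some s2l[j] := List.getElem?_eq_getElem hj
    simp only [rowVal, hrev, frB]
    by_cases hc : c = s2l[j]
    · have hcond : (j + 1 ≠ 0 ∧ s2l[j + 1 - 1]? = some c) := by
        refine ⟨by omega, ?_⟩
        simpa [hget] using congrArg some hc.symm
      rw [if_pos hc, if_pos hcond]
      simp only [Nat.add_sub_cancel]
      push_cast [List.length_append, List.length_singleton]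
      omega
    · have hcond : ¬ (j + 1 ≠ 0 ∧ s2l[j + 1 - 1]? = some c) := by
        rintro ⟨-, h2⟩
        apply hc
        simp only [Nat.add_sub_cancel, hget, Option.some.injEq] at h2
        exact h2.symm
      rw [if_neg hc, if_neg hcond]
      push_cast [List.length_append, List.length_singleton]
      omega

theorem dpRows_spec (s2l : List Char) : ∀ (suf p : List Char),
    dpRowsA s2l (rowOf s2l p) (p.length : Int) suf = rowOf s2l (p ++ suf) := by
  intro suf
  induction suf with
  | nil => intro p; simp [dpRowsA]
  | cons c cs ih =>
    intro p
    simp only [dpRowsA]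
    rw [row_step s2l p c,
      show ((p.length : Int) + 1) = (((p ++ [c]).length : Nat) : Int) by simp,
      ih (p ++ [c])]
    simp

theorem rowOf_nil (s2l : List Char) :
    rowOf s2l [] = List.replicate (s2l.length + 1) 0 := by
  unfold rowOf
  rw [show (List.range (s2l.length + 1)).map (rowVal s2l [])
      = (List.range (s2l.length + 1)).map (fun _ => (0 : Int)) from
    List.map_congr_left (fun j _ => by simp [rowVal, frB])]
  simp

-- folding Int-min of (n - u j) equals n minus folding Nat-max of u j
theorem fold_minmax (n : Int) (u : Nat → Nat) :
    ∀ (l : List Nat) (b : Nat),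
    (l.map (fun j => n - (u j : Int))).foldl min (n - (b : Int))
      = n - ((l.foldl (fun acc j => max acc (u j)) b : Nat) : Int) := by
  intro l
  induction l with
  | nil => intro b; simp
  | cons j rest ih =>
    intro b
    simp only [List.map_cons, List.foldl_cons]
    have hmm : min (n - (b : Int)) (n - (u j : Int)) = n - ((max b (u j) : Nat) : Int) := by
      push_cast
      simp only [min_def, max_def]
      split_ifs <;> omega
    rw [hmm]
    exact ih (max b (u j))

-- ===== VERDICT (by name: the statement is the Claim_ definition above) =====
theorem min_delete2_spec : Claim_equal_min_delete2 := by
  intro s1 s2 _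
  unfold Spec_min_delete2 min_delete2 min_delete2_alt
  simp only []
  set s1l := s1.toList with hs1
  set s2l := s2.toList with hs2
  have hdp : dpRowsA s2l (List.replicate (s2l.length + 1) 0) 0 s1l = rowOf s2l s1l := by
    rw [← rowOf_nil s2l]
    simpa using dpRows_spec s2l s1l []
  rw [hdp]
  have hval : ∀ j, rowVal s2l s1l j
      = (s1l.length : Int) - (((j - frB s2l s1l.reverse j : Nat)) : Int) := by
    intro j
    have hle := frB_le s2l s1l.reverse j
    simp only [rowVal]
    push_cast [Nat.cast_sub hle]
    ring
  have hrow : rowOf s2l s1l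
      = ((s1l.length : Int) - (((0 : Nat)) : Int))
        :: (List.range s2l.length).map
          (fun j => (s1l.length : Int) - (((j + 1 - frB s2l s1l.reverse (j + 1) : Nat)) : Int)) := by
    unfold rowOf
    rw [range_map_cons s2l.length (rowVal s2l s1l)]
    refine congrArg₂ List.cons ?_ ?_
    · simp [rowVal, frB_zero]
    · exact List.map_congr_left (fun j _ => hval (j + 1))
  rw [hrow]
  have hbest : (List.range (s2l.length + 1)).foldl
        (fun best j => max best (j - frB s2l s1l.reverse j)) 0
      = (List.range s2l.length).foldl
        (fun acc j => max acc (j + 1 - frB s2l s1l.reverse (j + 1))) 0 := by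
    rw [List.range_succ_eq_map, List.foldl_cons, List.foldl_map]
    simp only [Nat.zero_sub, Nat.max_self]
  rw [hbest]
  exact fold_minmax (s1l.length : Int)
    (fun j => j + 1 - frB s2l s1l.reverse (j + 1)) (List.range s2l.length) 0
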